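-- pv_equiv track=rewrite | github.com/Sahilchawla1094/tambola-streamlit | game.py | check_prize
-- ===== SOURCE A (Python) =====
-- def all_numbers(grid: list) -> list[int]:
--     return [n for row in grid for n in row if n > 0]
--
-- def corner_numbers(grid: list) -> list[int]:
--     top = [n for n in grid[0] if n > 0]
--     bot = [n for n in grid[2] if n > 0]
--     return [top[0], top[-1], bot[0], bot[-1]]
--
-- def check_prize(prize_id: str, grid: list, called: set) -> bool:
--     match prize_id:
--         case "EARLY_FIVE":
--             return sum(1 for n in all_numbers(grid) if n in called) >= 5
--         case "TOP_LINE":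
--             return all(n in called for n in grid[0] if n > 0)
--         case "MIDDLE_LINE":
--             return all(n in called for n in grid[1] if n > 0)
--         case "BOTTOM_LINE":
--             return all(n in called for n in grid[2] if n > 0)
--         case "FOUR_CORNERS":
--             return all(n in called for n in corner_numbers(grid))
--         case "FULL_HOUSE":
--             return all(n in called for n in all_numbers(grid))
--     return False
-- ===== SOURCE B (Python) =====
-- def check_prize(prize_id: str, grid: list, called: set) -> bool:
--     # One uniform sweep over the grid builds per-row statistics (hit count, positive
--     # count, first/last-positive-called flags); a small decision table then reads them.
--     stats = []
--     for row in grid: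
--         hits = total = 0
--         first_hit = last_hit = False
--         for n in row:
--             if n > 0:
--                 total += 1
--                 ok = n in called
--                 hits += ok
--                 if total == 1:
--                     first_hit = ok
--                 last_hit = ok
--         stats.append((hits, total, first_hit, last_hit))
--     if prize_id == "EARLY_FIVE":
--         return sum(s[0] for s in stats) >= 5
--     if prize_id == "FULL_HOUSE":
--         return all(s[0] == s[1] for s in stats)
--     if prize_id in ("TOP_LINE", "MIDDLE_LINE", "BOTTOM_LINE"):
--         i = 0 if prize_id == "TOP_LINE" else 1 if prize_id == "MIDDLE_LINE" else 2
--         h, t, _, _ = stats[i]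
--         return h == t
--     if prize_id == "FOUR_CORNERS":
--         return stats[0][2] and stats[0][3] and stats[2][2] and stats[2][3]
--     return False
-- ===== Notes on version B (the rewrite author's own statement) =====
-- stated objective: alternative
-- what changed: Instead of dispatching on the prize and scanning per branch with all()/sum() comprehensions, B makes one uniform sweep that precomputes per-row statistics (hit count, positive count, first/last-positive-called flags) and then decides every prize by reading those statistics.
import Mathlib
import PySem

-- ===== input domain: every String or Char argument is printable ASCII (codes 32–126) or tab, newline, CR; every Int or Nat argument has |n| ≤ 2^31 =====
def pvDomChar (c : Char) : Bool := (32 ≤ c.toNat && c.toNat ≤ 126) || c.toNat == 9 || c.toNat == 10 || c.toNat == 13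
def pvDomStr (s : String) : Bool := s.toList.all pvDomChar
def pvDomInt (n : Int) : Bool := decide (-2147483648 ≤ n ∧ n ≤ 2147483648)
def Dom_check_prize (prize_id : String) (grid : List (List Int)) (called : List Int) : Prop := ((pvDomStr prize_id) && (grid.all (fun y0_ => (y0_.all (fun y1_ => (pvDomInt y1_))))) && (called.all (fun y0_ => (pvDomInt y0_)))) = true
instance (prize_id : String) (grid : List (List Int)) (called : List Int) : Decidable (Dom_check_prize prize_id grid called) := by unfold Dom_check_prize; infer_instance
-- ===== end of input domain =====

-- B replaces A's per-prize dispatch-and-scan by one uniform sweep computing per-row statistics, read by a small decision table (alternative decomposition; same cost).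


-- ===== PORT A =====
-- all_numbers(grid): positives of all rows, row-major
def pvAllNumbers (grid : List (List Int)) : List Int :=
  (grid.flatMap id).filter (fun n => decide (n > 0))

-- grid[i] for nonnegative literal i; exact where Pre_ guarantees i < grid.length
def pvRow (grid : List (List Int)) (i : Nat) : List Int := grid.getD i []

-- corner_numbers(grid): [top[0], top[-1], bot[0], bot[-1]]; exact where Pre_ guarantees top/bot nonempty
def pvCorners (grid : List (List Int)) : List Int :=
  let top := (pvRow grid 0).filter (fun n => decide (n > 0))
  let bot := (pvRow grid 2).filter (fun n => decide (n > 0))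
  [top.headD 0, top.getLastD 0, bot.headD 0, bot.getLastD 0]

def check_prize (prize_id : String) (grid : List (List Int)) (called : List Int) : Bool :=
  if prize_id = "EARLY_FIVE" then
    decide (5 ≤ (pvAllNumbers grid).countP (fun n => called.contains n))
  else if prize_id = "TOP_LINE" then
    ((pvRow grid 0).filter (fun n => decide (n > 0))).all (fun n => called.contains n)
  else if prize_id = "MIDDLE_LINE" then
    ((pvRow grid 1).filter (fun n => decide (n > 0))).all (fun n => called.contains n)
  else if prize_id = "BOTTOM_LINE" then
    ((pvRow grid 2).filter (fun n => decide (n > 0))).all (fun n => called.contains n)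
  else if prize_id = "FOUR_CORNERS" then
    (pvCorners grid).all (fun n => called.contains n)
  else if prize_id = "FULL_HOUSE" then
    (pvAllNumbers grid).all (fun n => called.contains n)
  else false

-- ===== PORT B =====
-- inner loop body of Source B's sweep on state (hits, total, first_hit, last_hit)
def pvStep (called : List Int) (s : Int × Int × Bool × Bool) (n : Int) : Int × Int × Bool × Bool :=
  if n > 0 then
    let ok := called.contains n
    (s.1 + (if ok then 1 else 0), s.2.1 + 1,
     if s.2.1 + 1 = 1 then ok else s.2.2.1, ok)
  else s

-- one row's statistics: (hits, total, first_hit, last_hit)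
def pvRowStat (called : List Int) (row : List Int) : Int × Int × Bool × Bool :=
  row.foldl (pvStep called) (0, 0, false, false)

def check_prize_alt (prize_id : String) (grid : List (List Int)) (called : List Int) : Bool :=
  let stats := grid.map (pvRowStat called)
  if prize_id = "EARLY_FIVE" then
    decide (5 ≤ (stats.map (fun s => s.1)).sum)
  else if prize_id = "FULL_HOUSE" then
    stats.all (fun s => decide (s.1 = s.2.1))
  else if prize_id = "TOP_LINE" ∨ prize_id = "MIDDLE_LINE" ∨ prize_id = "BOTTOM_LINE" then
    let i : Nat := if prize_id = "TOP_LINE" then 0 else if prize_id = "MIDDLE_LINE" then 1 else 2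
    let s := stats.getD i (0, 0, false, false)   -- Pre_ guarantees i < grid.length (Python raises otherwise)
    decide (s.1 = s.2.1)
  else if prize_id = "FOUR_CORNERS" then
    let s0 := stats.getD 0 (0, 0, false, false)  -- Pre_ guarantees rows 0 and 2 exist
    let s2 := stats.getD 2 (0, 0, false, false)
    s0.2.2.1 && s0.2.2.2 && s2.2.2.1 && s2.2.2.2
  else false

-- ===== PRECONDITION & SPEC =====
-- Pre_ excludes exactly the inputs where Python A raises IndexError: a line prize whose
-- row index is missing, and FOUR_CORNERS when a needed row is missing or has no positives.
def Pre_check_prize (prize_id : String) (grid : List (List Int)) (called : List Int) : Prop :=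
  (prize_id = "TOP_LINE" → 1 ≤ grid.length) ∧
  (prize_id = "MIDDLE_LINE" → 2 ≤ grid.length) ∧
  (prize_id = "BOTTOM_LINE" → 3 ≤ grid.length) ∧
  (prize_id = "FOUR_CORNERS" → 3 ≤ grid.length ∧
    (grid.getD 0 []).filter (fun n => decide (n > 0)) ≠ [] ∧
    (grid.getD 2 []).filter (fun n => decide (n > 0)) ≠ [])
instance (prize_id : String) (grid : List (List Int)) (called : List Int) : Decidable (Pre_check_prize prize_id grid called) := by unfold Pre_check_prize; infer_instance

def pvWitness_check_prize : String × List (List Int) × List Int :=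
  ("FOUR_CORNERS", [[1, 2], [4], [7, 8]], [1, 2, 7, 8])

def Spec_check_prize (prize_id : String) (grid : List (List Int)) (called : List Int) (out : Bool) : Prop := out = check_prize_alt prize_id grid called
instance (prize_id : String) (grid : List (List Int)) (called : List Int) (out : Bool) : Decidable (Spec_check_prize prize_id grid called out) := by unfold Spec_check_prize; infer_instance

-- ===== CLAIM (what is proved, stated in full; the proofs are below) =====
def Claim_equal_check_prize : Prop := ∀ (prize_id : String) (grid : List (List Int)) (called : List Int), Dom_check_prize prize_id grid called → Pre_check_prize prize_id grid called → Spec_check_prize prize_id grid called (check_prize prize_id grid called)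

-- ===== LEMMAS AND PROOFS =====
theorem pv_tail (called : List Int) (l : List Int) (h t : Int) (fh : Bool) (prev : Int)
    (ht : 1 ≤ t) :
    l.foldl (fun s n =>
        (s.1 + (if called.contains n then 1 else 0), s.2.1 + 1,
         if s.2.1 + 1 = 1 then called.contains n else s.2.2.1, called.contains n))
      (h, t, fh, called.contains prev)
    = (h + (l.countP (fun n => called.contains n) : Int), t + (l.length : Int), fh,
       called.contains (l.getLastD prev)) := by
  induction l generalizing h t prev with
  | nil => simp
  | cons a l ih =>
    simp only [List.foldl_cons]
    have h1 : ¬ (t + 1 = 1) := by omega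
    rw [if_neg h1]
    rw [ih (h + (if called.contains a then 1 else 0)) (t + 1) a (by omega)]
    simp only [List.getLastD_cons, List.countP_cons, List.length_cons, Prod.mk.injEq]
    exact ⟨by push_cast; by_cases hc : called.contains a <;> simp [hc] <;> ring, by push_cast; ring, trivial⟩
theorem pvStep_eq (called : List Int) (s : Int × Int × Bool × Bool) (n : Int) :
    pvStep called s n =
      if decide (n > 0) = true then
        (s.1 + (if called.contains n then 1 else 0), s.2.1 + 1,
         if s.2.1 + 1 = 1 then called.contains n else s.2.2.1, called.contains n)
      else s := by
  unfold pvStep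
  by_cases h : n > 0 <;> simp [h]
theorem pvRowStat_eq (called row : List Int) :
    pvRowStat called row =
      (((row.filter (fun n => decide (n > 0))).countP (fun n => called.contains n) : Int),
       ((row.filter (fun n => decide (n > 0))).length : Int),
       !(row.filter (fun n => decide (n > 0))).isEmpty &&
         called.contains ((row.filter (fun n => decide (n > 0))).headD 0),
       !(row.filter (fun n => decide (n > 0))).isEmpty &&
         called.contains ((row.filter (fun n => decide (n > 0))).getLastD 0)) := by
  unfold pvRowStat
  rw [show pvStep called = (fun (s : Int × Int × Bool × Bool) (n : Int) =>
      if decide (n > 0) = true then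
        (s.1 + (if called.contains n then 1 else 0), s.2.1 + 1,
         if s.2.1 + 1 = 1 then called.contains n else s.2.2.1, called.contains n)
      else s) from funext fun s => funext fun n => pvStep_eq called s n]
  rw [← List.foldl_filter]
  cases hf : row.filter (fun n => decide (n > 0)) with
  | nil => simp
  | cons a l =>
    simp only [List.foldl_cons]
    rw [show ((0:Int) + if called.contains a = true then 1 else 0, (0:Int) + 1,
        if (0:Int) + 1 = 1 then called.contains a else false, called.contains a)
      = ((if called.contains a = true then (1:Int) else 0), (1:Int), called.contains a, called.contains a)
      from by norm_num]
    rw [pv_tail called l _ 1 (called.contains a) a (le_refl 1)]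
    simp only [List.getLastD_cons, List.countP_cons, List.length_cons, List.headD_cons,
      List.isEmpty_cons, Bool.not_false, Bool.true_and, Prod.mk.injEq]
    exact ⟨by push_cast; by_cases hc : called.contains a <;> simp [hc] <;> ring, by push_cast; ring, trivial⟩

-- countP over the flattened positives equals the sum of per-row counts.
theorem pv_countP_flatMap (called : List Int) (grid : List (List Int)) :
    ((pvAllNumbers grid).countP (fun n => called.contains n) : Int)
      = (grid.map (fun r =>
          (((r.filter (fun n => decide (n > 0))).countP (fun n => called.contains n) : Int)))).sum := by
  induction grid with
  | nil => simp [pvAllNumbers]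
  | cons r g ih =>
    simp only [pvAllNumbers, List.flatMap_cons, id, List.filter_append, List.countP_append,
      List.map_cons, List.sum_cons] at *
    push_cast
    omega

-- all over the flattened positives equals every row being all.
theorem pv_all_flatMap (called : List Int) (grid : List (List Int)) :
    (pvAllNumbers grid).all (fun n => called.contains n)
      = grid.all (fun r => (r.filter (fun n => decide (n > 0))).all (fun n => called.contains n)) := by
  rw [Bool.eq_iff_iff]
  simp only [pvAllNumbers, List.all_eq_true, List.mem_filter, List.mem_flatMap, id]
  aesop

-- all() equals count-equals-length for the hit predicate.
theorem pv_all_eq_count (p : Int → Bool) (l : List Int) :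
    l.all p = decide (l.countP p = l.length) := by
  rw [Bool.eq_iff_iff]
  simp [List.all_eq_true, List.countP_eq_length]

-- getD through a map, index in range.
theorem pv_getD_map (grid : List (List Int)) (f : List Int → Int × Int × Bool × Bool)
    (i : Nat) (hi : i < grid.length) (d : Int × Int × Bool × Bool) :
    (grid.map f).getD i d = f (grid.getD i []) := by
  rw [List.getD_eq_getElem?_getD, List.getD_eq_getElem?_getD, List.getElem?_map]
  rw [List.getElem?_eq_getElem hi]
  simp

-- one row: A's all() over the positives equals B's hits = total, row in range.
theorem pv_line (called : List Int) (grid : List (List Int)) (i : Nat) (hi : i < grid.length) :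
    ((grid.getD i []).filter (fun n => decide (n > 0))).all (fun n => called.contains n)
      = decide (((grid.map (pvRowStat called)).getD i (0, 0, false, false)).1
          = ((grid.map (pvRowStat called)).getD i (0, 0, false, false)).2.1) := by
  rw [pv_getD_map grid _ i hi, pvRowStat_eq, pv_all_eq_count]
  simp only [decide_eq_decide]
  omega

-- EARLY_FIVE: the global hit count equals the sum of per-row hit counts.
theorem pv_early (called : List Int) (grid : List (List Int)) :
    decide (5 ≤ (pvAllNumbers grid).countP (fun n => called.contains n))
      = decide (5 ≤ (((grid.map (pvRowStat called)).map (fun s => s.1)).sum : Int)) := by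
  have hmap : (grid.map (pvRowStat called)).map (fun s => s.1)
      = grid.map (fun r =>
          (((r.filter (fun n => decide (n > 0))).countP (fun n => called.contains n) : Int))) := by
    rw [List.map_map]
    exact List.map_congr_left fun r _ => by simp [Function.comp, pvRowStat_eq]
  rw [hmap, ← pv_countP_flatMap]
  simp only [decide_eq_decide]
  omega

-- FULL_HOUSE per row: all() over the positives equals hits = total.
theorem pv_row_full (called : List Int) (r : List Int) :
    (r.filter (fun n => decide (n > 0))).all (fun n => called.contains n)
      = decide ((pvRowStat called r).1 = (pvRowStat called r).2.1) := by
  rw [pvRowStat_eq, pv_all_eq_count]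
  simp only [decide_eq_decide]
  omega

-- ===== VERDICT (by name: the statement is the Claim_ definition above) =====
theorem check_prize_spec : Claim_equal_check_prize := by
  intro prize_id grid called _ hpre
  obtain ⟨p1, p2, p3, p4⟩ := hpre
  unfold Spec_check_prize check_prize check_prize_alt
  by_cases h1 : prize_id = "EARLY_FIVE"
  · subst h1
    simp only [String.reduceEq, reduceIte]
    exact pv_early called grid
  by_cases h6 : prize_id = "FULL_HOUSE"
  · subst h6
    simp only [String.reduceEq, reduceIte]
    rw [pv_all_flatMap, List.all_map]
    exact congrArg grid.all (funext fun r => pv_row_full called r)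
  by_cases h2 : prize_id = "TOP_LINE"
  · subst h2
    simp only [String.reduceEq, reduceIte, true_or]
    exact pv_line called grid 0 (by have := p1 rfl; omega)
  by_cases h3 : prize_id = "MIDDLE_LINE"
  · subst h3
    simp only [String.reduceEq, reduceIte, true_or, or_true]
    exact pv_line called grid 1 (by have := p2 rfl; omega)
  by_cases h4 : prize_id = "BOTTOM_LINE"
  · subst h4
    simp only [String.reduceEq, reduceIte, or_true]
    exact pv_line called grid 2 (by have := p3 rfl; omega)
  by_cases h5 : prize_id = "FOUR_CORNERS"
  · subst h5
    obtain ⟨hlen, htop, hbot⟩ := p4 rfl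
    simp only [String.reduceEq, reduceIte, or_self]
    unfold pvCorners pvRow
    rw [pv_getD_map grid _ 0 (by omega), pv_getD_map grid _ 2 (by omega),
      pvRowStat_eq, pvRowStat_eq]
    have ht : ((grid.getD 0 []).filter (fun n => decide (n > 0))).isEmpty = false := by
      cases hh : (grid.getD 0 []).filter (fun n => decide (n > 0)) with
      | nil => exact absurd hh htop
      | cons _ _ => rfl
    have hb : ((grid.getD 2 []).filter (fun n => decide (n > 0))).isEmpty = false := by
      cases hh : (grid.getD 2 []).filter (fun n => decide (n > 0)) with
      | nil => exact absurd hh hbot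
      | cons _ _ => rfl
    simp only [ht, hb, List.all_cons, List.all_nil, Bool.not_false, Bool.true_and,
      Bool.and_true, Bool.and_assoc]
  · simp [h1, h2, h3, h4, h5, h6]
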